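-- pv_equiv track=rewrite | github.com/vernikagupta/python | Python Assignmenet 1/Divisibility by 7 and 5.py | divisible_by_7
-- ===== SOURCE A (Python) =====
-- def divisible_by_7(number):
--     if number < 0:
--         return divisible_by_7(-number)
--
--     elif number == 0 or number == 7:
--         return number
--
--     elif number < 10:
--         return number
--
--     return divisible_by_7(( number // 10 - 2 * ( number - number // 10 * 10 )))
-- ===== SOURCE B (Python) =====
-- def divisible_by_7(number):
--     number = abs(number)
--     while number >= 10:
--         number = abs(number // 10 - 2 * (number % 10))
--     return number
-- ===== Notes on version B (the rewrite author's own statement) =====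
-- stated objective: simpler
-- what changed: Replaces the tail recursion (with separate negative-flip and ==0/==7 branches) by a single while loop over one running value that takes the absolute value each step and stops below 10.
import Mathlib
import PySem

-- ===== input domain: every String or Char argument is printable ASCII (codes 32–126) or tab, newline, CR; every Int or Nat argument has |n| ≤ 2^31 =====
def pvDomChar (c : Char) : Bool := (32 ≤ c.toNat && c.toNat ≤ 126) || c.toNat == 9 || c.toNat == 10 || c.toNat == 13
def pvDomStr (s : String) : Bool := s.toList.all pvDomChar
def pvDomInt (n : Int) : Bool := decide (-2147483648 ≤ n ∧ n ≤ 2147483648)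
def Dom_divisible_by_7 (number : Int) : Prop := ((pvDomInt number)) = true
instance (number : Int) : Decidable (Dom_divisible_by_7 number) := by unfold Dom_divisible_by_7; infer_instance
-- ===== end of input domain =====

-- B replaces the tail recursion by a single while loop (abs each step, stop below 10); same values everywhere.

-- ===== PORT A =====
def divisible_by_7 (number : Int) : Int :=
  if number < 0 then divisible_by_7 (-number)
  else if number = 0 ∨ number = 7 then number
  else if number < 10 then number
  else divisible_by_7 (PySem.Int.floordiv number 10 -
        2 * (number - PySem.Int.floordiv number 10 * 10))
termination_by 2 * number.natAbs + (if number < 0 then 1 else 0)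
decreasing_by
  · split_ifs <;> omega
  · rw [PySem.Int.floordiv_eq_ediv_of_pos (by norm_num : (0:Int) < 10)]
    split_ifs <;> omega

-- ===== PORT B =====
-- the while-loop body of Source B (entered with number = abs(number))
def divisible_by_7_altLoop (number : Int) : Int :=
  if 10 ≤ number then
    divisible_by_7_altLoop |PySem.Int.floordiv number 10 - 2 * PySem.Int.mod number 10|
  else number
termination_by number.natAbs
decreasing_by
  rw [PySem.Int.floordiv_eq_ediv_of_pos (by norm_num : (0:Int) < 10),
      PySem.Int.mod_eq_emod_of_pos (by norm_num : (0:Int) < 10)]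
  rcases abs_cases (number / 10 - 2 * (number % 10)) with ⟨h1, h2⟩ | ⟨h1, h2⟩ <;> rw [h1] <;> omega

def divisible_by_7_alt (number : Int) : Int :=
  divisible_by_7_altLoop |number|

-- ===== PRECONDITION & SPEC =====
def Spec_divisible_by_7 (number : Int) (out : Int) : Prop := out = divisible_by_7_alt number
instance (number : Int) (out : Int) : Decidable (Spec_divisible_by_7 number out) := by unfold Spec_divisible_by_7; infer_instance

-- ===== CLAIM (what is proved, stated in full; the proofs are below) =====
def Claim_equal_divisible_by_7 : Prop := ∀ (number : Int), Dom_divisible_by_7 number → Spec_divisible_by_7 number (divisible_by_7 number)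

-- ===== LEMMAS AND PROOFS =====

theorem altLoop_small {n : Int} (h : ¬ 10 ≤ n) : divisible_by_7_altLoop n = n := by
  rw [divisible_by_7_altLoop, if_neg h]

theorem div7_eq_altLoop_abs (n : Int) : divisible_by_7 n = divisible_by_7_altLoop |n| := by
  fun_induction divisible_by_7 n with
  | case1 n h ih =>
      rw [ih, abs_neg]
  | case2 n h0 h1 =>
      rw [abs_of_nonneg (by omega), altLoop_small (by omega)]
  | case3 n h0 h1 h2 =>
      rw [abs_of_nonneg (by omega), altLoop_small (by omega)]
  | case4 n h0 h1 h2 ih =>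
      have hmod := PySem.Int.floordiv_mul_add_mod n 10
      have hstep : divisible_by_7_altLoop n =
          divisible_by_7_altLoop |PySem.Int.floordiv n 10 - 2 * PySem.Int.mod n 10| := by
        rw [divisible_by_7_altLoop, if_pos (by omega : (10:Int) ≤ n)]
      rw [ih, abs_of_nonneg (show (0:Int) ≤ n by omega), hstep]
      congr 2
      omega

-- ===== VERDICT (by name: the statement is the Claim_ definition above) =====
theorem divisible_by_7_spec : Claim_equal_divisible_by_7 := by
  intro n _
  unfold Spec_divisible_by_7 divisible_by_7_alt
  exact div7_eq_altLoop_abs n
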